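-- pv_equiv track=rewrite | github.com/jspmarc/BotWangy | src/matching.py | find_last_occurance
-- ===== SOURCE A (Python) =====
-- import string
--
-- def find_last_occurance(s: str) -> 'dict[str, int]':
--     '''
--     Fungsi untuk mendapatkan kemunculan terakhir dari semua karakter pada
--     sebuah string
--
--     Parameters
--     ----------
--     s : str
--         string yang ingin dicari kemunculan terakhir setiap karakternya
--
--     Returns
--     -------
--     dict[str, int]
--         dictionary dengan key adalah karakter dan value adalah integer, yaitu
--         jumlah kemunculan terakhir karakter pada key
--     '''
--     ret = dict()
--
--     for c in string.printable:
--         ret[c] = -1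
--
--     i = 0
--     for c in s:
--         ret[c] = i
--         i += 1
--
--     return ret
-- ===== SOURCE B (Python) =====
-- import string
--
-- def find_last_occurance(s: str) -> 'dict[str, int]':
--     ret = {c: s.rfind(c) for c in string.printable}
--     for c in s:
--         if c not in ret:
--             ret[c] = s.rfind(c)
--     return ret
-- ===== Notes on version B (the rewrite author's own statement) =====
-- stated objective: alternative
-- what changed: B builds the dict by a comprehension over string.printable computing each character's last index directly with s.rfind, with a membership-guarded pass appending non-printable characters, instead of A's forward enumeration loop that overwrites each key's index as it goes.
import Mathlib
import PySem

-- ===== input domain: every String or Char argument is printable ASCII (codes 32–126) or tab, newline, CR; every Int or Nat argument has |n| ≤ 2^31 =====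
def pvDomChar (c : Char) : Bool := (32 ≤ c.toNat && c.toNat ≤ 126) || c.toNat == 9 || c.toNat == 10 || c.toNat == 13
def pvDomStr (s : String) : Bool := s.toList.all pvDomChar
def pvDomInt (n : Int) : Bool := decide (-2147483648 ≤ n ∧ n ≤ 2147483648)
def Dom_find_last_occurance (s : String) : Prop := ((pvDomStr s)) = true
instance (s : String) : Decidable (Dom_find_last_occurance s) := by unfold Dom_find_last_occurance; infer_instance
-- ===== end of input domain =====

-- B replaces A's forward index loop with a dict comprehension computing each key's last index via rfind; alternative decomposition, same cost class.

-- ===== PORT A =====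
-- string.printable, in Python's order
def pyPrintable : String := "0123456789abcdefghijklmnopqrstuvwxyzABCDEFGHIJKLMNOPQRSTUVWXYZ!\"#$%&'()*+,-./:;<=>?@[\\]^_`{|}~ \t\n\r\x0B\x0C"

def find_last_occurance (s : String) : List (String × Int) :=
  let ret : PySem.Dict String Int :=
    pyPrintable.toList.foldl (fun d c => d.insert (String.ofList [c]) (-1)) PySem.Dict.empty
  let fin := s.toList.foldl
    (fun (p : PySem.Dict String Int × Int) c => (p.1.insert (String.ofList [c]) p.2, p.2 + 1))
    (ret, 0)
  fin.1.items

-- ===== PORT B =====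
-- exact port of Python's str.rfind for a single-character needle: highest index of c in l, -1 if absent
def pyRfindChar (l : List Char) (c : Char) (i : Int) (w : Int) : Int :=
  match l with
  | [] => w
  | a :: t => pyRfindChar t c (i + 1) (if a == c then i else w)

def find_last_occurance_alt (s : String) : List (String × Int) :=
  let ret : PySem.Dict String Int :=
    pyPrintable.toList.foldl
      (fun d c => d.insert (String.ofList [c]) (pyRfindChar s.toList c 0 (-1))) PySem.Dict.empty
  let ret2 := s.toList.foldl
    (fun d c => if d.contains (String.ofList [c]) then d
                else d.insert (String.ofList [c]) (pyRfindChar s.toList c 0 (-1))) ret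
  ret2.items

-- ===== PRECONDITION & SPEC =====
def Spec_find_last_occurance (s : String) (out : List (String × Int)) : Prop := out = find_last_occurance_alt s
instance (s : String) (out : List (String × Int)) : Decidable (Spec_find_last_occurance s out) := by unfold Spec_find_last_occurance; infer_instance

-- ===== CLAIM (what is proved, stated in full; the proofs are below) =====
def Claim_equal_find_last_occurance : Prop := ∀ (s : String), Dom_find_last_occurance s → Spec_find_last_occurance s (find_last_occurance s)

-- ===== LEMMAS AND PROOFS =====

theorem char_toNat_inj {a b : Char} (h : a.toNat = b.toNat) : a = b := by
  apply Char.ext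
  unfold Char.toNat at h
  exact UInt32.toNat_inj.mp h

theorem mk1_inj (a b : Char) : (String.ofList [a] = String.ofList [b]) ↔ a = b := by
  constructor
  · intro h
    have := congrArg String.toList h
    simpa using this
  · intro h; rw [h]

set_option maxRecDepth 4000 in
theorem nodupP : pyPrintable.toList.Nodup := by decide

set_option maxRecDepth 4000 in
theorem memP_of_dom (c : Char) (h : pvDomChar c = true) : c ∈ pyPrintable.toList := by
  have hb : ∀ n < 127, ((32 ≤ n && n ≤ 126) || n == 9 || n == 10 || n == 13) = true →
      n ∈ pyPrintable.toList.map Char.toNat := by decide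
  have hlt : c.toNat < 127 := by
    unfold pvDomChar at h
    simp only [Bool.or_eq_true, Bool.and_eq_true, decide_eq_true_eq, beq_iff_eq] at h
    omega
  have hm : c.toNat ∈ pyPrintable.toList.map Char.toNat := by
    apply hb c.toNat hlt
    simpa [pvDomChar] using h
  rcases List.mem_map.mp hm with ⟨a, ha, hEq⟩
  have : a = c := char_toNat_inj hEq
  exact this ▸ ha

-- the seed dict of either port: items are printable chars in order
theorem seed_items (v : Char → Int) :
    (pyPrintable.toList.foldl
      (fun (d : PySem.Dict String Int) c => d.insert (String.ofList [c]) (v c)) PySem.Dict.empty).items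
    = pyPrintable.toList.map (fun c => (String.ofList [c], v c)) := by
  have h := PySem.Dict.items_foldl_insert_fresh (l := pyPrintable.toList)
      (k := fun c => String.ofList [c]) (v := v) (d := (PySem.Dict.empty : PySem.Dict String Int))
      (by intro a _; simp [PySem.Dict.contains_empty])
      (List.Nodup.map (fun a b hab => (mk1_inj a b).mp hab) nodupP)
  simpa using h

-- A's loop: the value at key c after folding from index i with accumulator d
theorem loopA_getD (l : List Char) (d : PySem.Dict String Int) (i : Int) (c : Char) (v0 : Int) :
    ((l.foldl (fun (p : PySem.Dict String Int × Int) ch => (p.1.insert (String.ofList [ch]) p.2, p.2 + 1)) (d, i)).1).getD (String.ofList [c]) v0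
    = pyRfindChar l c i (d.getD (String.ofList [c]) v0) := by
  induction l generalizing d i with
  | nil => simp [pyRfindChar]
  | cons a t ih =>
      simp only [List.foldl_cons, pyRfindChar]
      rw [ih]
      congr 1
      rw [PySem.Dict.getD_insert]
      by_cases hac : a = c
      · simp [hac]
      · simp [hac, (mk1_inj c a).not.mpr (fun h => hac h.symm)]

-- A's loop preserves the key list when every inserted key is already present
theorem loopA_keys (l : List Char) (d : PySem.Dict String Int) (i : Int)
    (h : ∀ ch ∈ l, d.contains (String.ofList [ch]) = true) :
    ((l.foldl (fun (p : PySem.Dict String Int × Int) ch => (p.1.insert (String.ofList [ch]) p.2, p.2 + 1)) (d, i)).1).keys = d.keys := by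
  induction l generalizing d i with
  | nil => rfl
  | cons a t ih =>
      simp only [List.foldl_cons]
      rw [ih]
      · exact PySem.Dict.keys_insert_of_contains _ _ (h a (List.mem_cons_self ..))
      · intro ch hch
        rw [PySem.Dict.contains_insert]
        simp [h ch (List.mem_cons_of_mem _ hch)]

-- B's second loop is the identity when every key is already present
theorem loopB_noop (l : List Char) (f : Char → Int) (d : PySem.Dict String Int)
    (h : ∀ ch ∈ l, d.contains (String.ofList [ch]) = true) :
    (l.foldl (fun d ch => if d.contains (String.ofList [ch]) then d
                          else d.insert (String.ofList [ch]) (f ch)) d) = d := by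
  induction l with
  | nil => rfl
  | cons a t ih =>
      simp only [List.foldl_cons, h a (List.mem_cons_self ..), if_true]
      exact ih (fun ch hch => h ch (List.mem_cons_of_mem _ hch))

-- ===== VERDICT (by name: the statement is the Claim_ definition above) =====
set_option maxRecDepth 8000 in
set_option maxHeartbeats 2000000 in
theorem find_last_occurance_spec : Claim_equal_find_last_occurance := by
  intro s hdom
  unfold Spec_find_last_occurance find_last_occurance find_last_occurance_alt
  -- facts about the seed dict
  set d0 : PySem.Dict String Int :=
    pyPrintable.toList.foldl (fun d c => d.insert (String.ofList [c]) (-1)) PySem.Dict.empty with hd0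
  set dB : PySem.Dict String Int :=
    pyPrintable.toList.foldl
      (fun d c => d.insert (String.ofList [c]) (pyRfindChar s.toList c 0 (-1))) PySem.Dict.empty with hdB
  have hitems0 : d0.items = pyPrintable.toList.map (fun c => (String.ofList [c], (-1 : Int))) :=
    seed_items _
  have hitemsB : dB.items = pyPrintable.toList.map (fun c => (String.ofList [c], pyRfindChar s.toList c 0 (-1))) :=
    seed_items _
  have hkeys0 : d0.keys = pyPrintable.toList.map (fun c => String.ofList [c]) := by
    show d0.items.map (·.1) = _
    simp [hitems0]
  have hnodk : d0.keys.Nodup := by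
    rw [hkeys0]
    exact List.Nodup.map (fun a b hab => (mk1_inj a b).mp hab) nodupP
  have hdomch : ∀ ch ∈ s.toList, pvDomChar ch = true := by
    intro ch hch
    exact List.all_eq_true.mp hdom ch hch
  have hcont0 : ∀ ch ∈ s.toList, d0.contains (String.ofList [ch]) = true := by
    intro ch hch
    rw [PySem.Dict.contains_iff_mem_keys, hkeys0]
    exact List.mem_map_of_mem (memP_of_dom ch (hdomch ch hch))
  have hkeysB : dB.keys = pyPrintable.toList.map (fun c => String.ofList [c]) := by
    show dB.items.map (·.1) = _
    simp [hitemsB]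
  have hcontB : ∀ ch ∈ s.toList, dB.contains (String.ofList [ch]) = true := by
    intro ch hch
    rw [PySem.Dict.contains_iff_mem_keys, hkeysB]
    exact List.mem_map_of_mem (memP_of_dom ch (hdomch ch hch))
  -- A side
  set dA := (s.toList.foldl
      (fun (p : PySem.Dict String Int × Int) c => (p.1.insert (String.ofList [c]) p.2, p.2 + 1)) (d0, 0)).1 with hdA
  have hkeysA : dA.keys = d0.keys := loopA_keys s.toList d0 0 hcont0
  have hnodA : dA.keys.Nodup := hkeysA ▸ hnodk
  have hA : dA.items = pyPrintable.toList.map (fun c => (String.ofList [c], dA.getD (String.ofList [c]) 0)) := by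
    rw [PySem.Dict.items_eq_map_keys dA hnodA 0, hkeysA, hkeys0, List.map_map]
    rfl
  have hval : ∀ c ∈ pyPrintable.toList, dA.getD (String.ofList [c]) 0 = pyRfindChar s.toList c 0 (-1) := by
    intro c hc
    have hgd : d0.getD (String.ofList [c]) 0 = -1 :=
      PySem.Dict.getD_of_mem_items d0 (by rw [hitems0]; exact List.mem_map_of_mem hc) hnodk 0
    rw [hdA, loopA_getD, hgd]
  -- B side
  show (s.toList.foldl (fun (p : PySem.Dict String Int × Int) c => (p.1.insert (String.ofList [c]) p.2, p.2 + 1)) (d0, 0)).1.items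
      = (s.toList.foldl (fun d c => if d.contains (String.ofList [c]) = true then d
                                    else d.insert (String.ofList [c]) (pyRfindChar s.toList c 0 (-1))) dB).items
  rw [← hdA, loopB_noop s.toList _ dB hcontB, hA, hitemsB]
  exact List.map_congr_left (fun c hc => by rw [hval c hc])
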